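-- pv_equiv track=rewrite | github.com/DIG-Network/proof_research | sub-problems/verifier-oracle-model/experiments/mod-m-threshold-alias-gap-set-scan/script.py | first_clean_m
-- ===== SOURCE A (Python) =====
-- def aliases_at_m(n: int, t: int, m: int) -> bool:
--     """Exists k1<t<=k2 with k1 ≡ k2 (mod m)."""
--     for k1 in range(0, t):
--         for k2 in range(t, n + 1):
--             if k1 % m == k2 % m:
--                 return True
--     return False
--
-- def first_clean_m(n: int, t: int) -> int:
--     m = 2
--     while True:
--         if not aliases_at_m(n, t, m):
--             return m
--         m += 1
--         if m > n + 5: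
--             raise RuntimeError("unexpected")
-- ===== SOURCE B (Python) =====
-- def first_clean_m(n: int, t: int) -> int:
--     # Closed form: with k1 in [0,t) and k2 in [t,n] both non-empty, the achievable
--     # differences k2-k1 are exactly {1,...,n}, so a residue collision at modulus m
--     # exists iff m <= n; hence the first clean modulus (starting at 2) is n+1.
--     # If either interval is empty (t < 1 or t > n) there is never a collision, so 2.
--     return n + 1 if 1 <= t <= n else 2
-- ===== Notes on version B (the rewrite author's own statement) =====
-- stated objective: faster
-- what changed: Replaced the triple loop (scan of moduli, each checked by a quadratic double scan for a residue collision) with the proved closed form: a cross-threshold collision at modulus m exists iff 1<=t<=n and m<=n, so the answer is n+1 when 1<=t<=n and 2 otherwise.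
import Mathlib
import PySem

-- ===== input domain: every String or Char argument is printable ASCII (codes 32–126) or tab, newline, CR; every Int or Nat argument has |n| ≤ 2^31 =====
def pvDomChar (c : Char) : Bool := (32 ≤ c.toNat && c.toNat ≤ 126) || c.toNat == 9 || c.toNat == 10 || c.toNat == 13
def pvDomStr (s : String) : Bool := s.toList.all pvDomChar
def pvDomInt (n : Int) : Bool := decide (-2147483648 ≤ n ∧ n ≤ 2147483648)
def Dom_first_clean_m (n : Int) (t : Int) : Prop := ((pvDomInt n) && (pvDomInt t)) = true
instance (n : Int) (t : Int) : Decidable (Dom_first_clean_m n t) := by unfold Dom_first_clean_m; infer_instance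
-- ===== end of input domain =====

-- B replaces A's triple loop by the proved closed form (n+1 if 1<=t<=n else 2): asymptotically faster.


-- ===== PORT A =====
-- aliases_at_m: exists k1 in [0,t), k2 in [t,n] with k1 % m == k2 % m (early-return scan = List.any)
def aliases_at_m (n : Int) (t : Int) (m : Int) : Bool :=
  (PySem.List.pyRange 0 t 1).any (fun k1 =>
    (PySem.List.pyRange t (n + 1) 1).any (fun k2 =>
      PySem.Int.mod k1 m == PySem.Int.mod k2 m))

-- the 'while True' loop; the two 0-branches correspond to the RuntimeError / fuel running out,
-- both proved unreachable (the loop always returns at some m ≤ n+1, and the fuel covers that).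
def firstCleanLoop (n : Int) (t : Int) : Nat → Int → Int
  | fuel, m =>
    if aliases_at_m n t m = false then m
    else if m + 1 > n + 5 then 0        -- Python: raise RuntimeError (unreachable)
    else
      match fuel with
      | 0 => 0                          -- fuel exhausted (unreachable)
      | f + 1 => firstCleanLoop n t f (m + 1)

def first_clean_m (n : Int) (t : Int) : Int := firstCleanLoop n t (n + 6).toNat 2

-- ===== PORT B =====
def first_clean_m_alt (n : Int) (t : Int) : Int :=
  if 1 ≤ t ∧ t ≤ n then n + 1 else 2

-- ===== PRECONDITION & SPEC =====
def Spec_first_clean_m (n : Int) (t : Int) (out : Int) : Prop := out = first_clean_m_alt n t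
instance (n : Int) (t : Int) (out : Int) : Decidable (Spec_first_clean_m n t out) := by unfold Spec_first_clean_m; infer_instance

-- ===== CLAIM (what is proved, stated in full; the proofs are below) =====
def Claim_equal_first_clean_m : Prop := ∀ (n : Int) (t : Int), Dom_first_clean_m n t → Spec_first_clean_m n t (first_clean_m n t)

-- ===== LEMMAS AND PROOFS =====

-- A residue collision across the threshold exists at modulus m (m ≥ 1) iff both
-- intervals are non-empty (1 ≤ t ≤ n) and m ≤ n.
theorem aliases_at_m_iff (n t m : Int) (hm : 1 ≤ m) :
    aliases_at_m n t m = true ↔ (1 ≤ t ∧ t ≤ n ∧ m ≤ n) := by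
  unfold aliases_at_m
  simp only [List.any_eq_true, PySem.List.mem_pyRange_one, beq_iff_eq]
  constructor
  · rintro ⟨k1, ⟨hk10, hk1t⟩, k2, ⟨hk2t, hk2n⟩, hmod⟩
    have hpos : 0 < m := by omega
    rw [PySem.Int.mod_eq_emod_of_pos hpos, PySem.Int.mod_eq_emod_of_pos hpos] at hmod
    have hdvd : m ∣ (k2 - k1) := by
      refine Int.dvd_of_emod_eq_zero ?_
      rw [Int.sub_emod, hmod]
      simp
    have hle : m ≤ k2 - k1 := Int.le_of_dvd (by omega) hdvd
    omega
  · rintro ⟨ht1, htn, hmn⟩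
    refine ⟨(if m ≤ t then t else m) - m, by constructor <;> omega,
            (if m ≤ t then t else m), by constructor <;> omega, ?_⟩
    have hpos : 0 < m := by omega
    rw [PySem.Int.mod_eq_emod_of_pos hpos, PySem.Int.mod_eq_emod_of_pos hpos]
    have : (if m ≤ t then t else m) - ((if m ≤ t then t else m) - m) = m := by omega
    conv_rhs => rw [show (if m ≤ t then t else m) = ((if m ≤ t then t else m) - m) + m by omega]
    simp

-- In the collision case (1 ≤ t ≤ n), the loop starting at any 2 ≤ m ≤ n+1 with enough
-- fuel returns n+1.
theorem loop_eq_succ (n t : Int) (h1 : 1 ≤ t) (h2 : t ≤ n) :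
    ∀ (fuel : Nat) (m : Int), 2 ≤ m → m ≤ n + 1 → (n + 1 - m).toNat ≤ fuel →
      firstCleanLoop n t fuel m = n + 1 := by
  intro fuel
  induction fuel with
  | zero =>
    intro m hm2 hmn hf
    have hmeq : m = n + 1 := by omega
    rw [firstCleanLoop]
    have hfalse : aliases_at_m n t m = false := by
      rw [Bool.eq_false_iff, Ne, aliases_at_m_iff n t m (by omega)]
      omega
    subst hmeq
    simp [hfalse]
  | succ f ih =>
    intro m hm2 hmn hf
    rw [firstCleanLoop]
    by_cases hcase : m ≤ n
    · have htrue : aliases_at_m n t m = true := by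
        rw [aliases_at_m_iff n t m (by omega)]; exact ⟨h1, h2, hcase⟩
      have hnot : ¬ (m + 1 > n + 5) := by omega
      rw [if_neg (by simp [htrue] : ¬ aliases_at_m n t m = false), if_neg hnot]
      exact ih (m + 1) (by omega) (by omega) (by omega)
    · have hmeq : m = n + 1 := by omega
      have hfalse : aliases_at_m n t m = false := by
        rw [Bool.eq_false_iff, Ne, aliases_at_m_iff n t m (by omega)]
        omega
      subst hmeq
      simp [hfalse]

-- ===== VERDICT (by name: the statement is the Claim_ definition above) =====
theorem first_clean_m_spec : Claim_equal_first_clean_m := by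
  intro n t _
  unfold Spec_first_clean_m first_clean_m first_clean_m_alt
  by_cases h : 1 ≤ t ∧ t ≤ n
  · rw [if_pos h]
    exact loop_eq_succ n t h.1 h.2 ((n + 6).toNat) 2 (by omega) (by omega) (by omega)
  · rw [if_neg h]
    rw [firstCleanLoop.eq_def]
    have hfalse : aliases_at_m n t 2 = false := by
      rw [Bool.eq_false_iff, Ne, aliases_at_m_iff n t 2 (by omega)]
      omega
    simp [hfalse]
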